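-- pv_equiv track=rewrite | github.com/pypi-data/pypi-mirror-401 | packages/ddi-fw/ddi_fw-0.0.297.tar.gz/ddi_fw-0.0.297/src/ddi_fw/langchain/chroma_storage.py | split_dataframe_indices
-- ===== SOURCE A (Python) =====
-- def split_dataframe_indices(df, min_size=512):
--     total_size = len(df)
--
--     # If the dataframe is smaller than min_size, return the entire range
--     if total_size <= min_size:
--         return [(0, total_size - 1)]
--
--     # List to store the start and end indices of each chunk
--     chunk_indices = []
--     start_idx = 0
--
--     # Calculate the minimum number of chunks needed to ensure each chunk has at least min_size
--     num_chunks = total_size // min_size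
--     remaining_rows = total_size
--
--     # Split into chunks
--     for i in range(num_chunks):
--         chunk_size = min_size
--         if (remaining_rows - chunk_size) < min_size:
--             chunk_size = remaining_rows  # Last chunk takes all remaining rows
--
--         # Calculate the ending index of the chunk (exclusive, hence chunk_size - 1)
--         end_idx = start_idx + chunk_size - 1
--         chunk_indices.append((start_idx, end_idx))
--
--         # Update the start index and remaining rows
--         start_idx += chunk_size
--         remaining_rows -= chunk_size
--
--     # If there are any remaining rows after the loop, they should form the last chunk
--     if remaining_rows > 0:
--         end_idx = start_idx + remaining_rows - 1
--         chunk_indices.append((start_idx, end_idx))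
--
--     return chunk_indices
-- ===== SOURCE B (Python) =====
-- def split_dataframe_indices(df, min_size=512):
--     total_size = len(df)
--     if total_size <= min_size:
--         return [(0, total_size - 1)]
--     num_chunks = total_size // min_size
--     chunks = [(i * min_size, (i + 1) * min_size - 1) for i in range(num_chunks - 1)]
--     chunks.append(((num_chunks - 1) * min_size, total_size - 1))
--     return chunks
-- ===== Notes on version B (the rewrite author's own statement) =====
-- stated objective: simpler
-- what changed: B replaces A's running start/remaining accumulator loop with its in-loop conditional and post-loop fixup by closed-form index arithmetic: each chunk's bounds are computed directly as (i*min_size, (i+1)*min_size-1), with the last chunk absorbing the remainder.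
-- outside the precondition, e.g. on split_dataframe_indices([1, 2, 3], -2): A returns [(0, 2)], B returns [(6, 2)]; on split_dataframe_indices([], -2): A returns [], B returns [(2, -1)]
import Mathlib
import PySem

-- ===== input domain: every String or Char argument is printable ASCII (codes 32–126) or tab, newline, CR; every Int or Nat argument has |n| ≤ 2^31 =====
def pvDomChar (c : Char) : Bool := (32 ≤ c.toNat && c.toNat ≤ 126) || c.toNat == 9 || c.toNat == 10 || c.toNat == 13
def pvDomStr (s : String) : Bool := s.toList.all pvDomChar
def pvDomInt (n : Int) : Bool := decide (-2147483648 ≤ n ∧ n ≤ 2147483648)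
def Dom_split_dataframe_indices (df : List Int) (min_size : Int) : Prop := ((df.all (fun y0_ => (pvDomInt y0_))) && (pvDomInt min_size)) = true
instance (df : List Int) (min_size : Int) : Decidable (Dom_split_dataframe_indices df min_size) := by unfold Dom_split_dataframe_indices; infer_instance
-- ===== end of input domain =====

-- B computes each chunk's bounds in closed form instead of A's running start/remaining accumulator: simpler, same cost.


-- ===== PORT A =====
-- loop body of A's for-loop: state = (chunk_indices, start_idx, remaining_rows); the index is unused
def pvStepA (min_size : Int) (st : List (Int × Int) × Int × Int) (_i : Int) : List (Int × Int) × Int × Int :=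
  let chunk_size := if st.2.2 - min_size < min_size then st.2.2 else min_size
  (st.1 ++ [(st.2.1, st.2.1 + chunk_size - 1)], st.2.1 + chunk_size, st.2.2 - chunk_size)

def split_dataframe_indices (df : List Int) (min_size : Int) : List (Int × Int) :=
  let total_size : Int := df.length
  if total_size ≤ min_size then [(0, total_size - 1)]
  else
    let num_chunks := PySem.Int.floordiv total_size min_size
    let st := (PySem.List.pyRange 0 num_chunks 1).foldl (pvStepA min_size) ([], 0, total_size)
    if st.2.2 > 0 then st.1 ++ [(st.2.1, st.2.1 + st.2.2 - 1)] else st.1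

-- ===== PORT B =====
def split_dataframe_indices_alt (df : List Int) (min_size : Int) : List (Int × Int) :=
  let total_size : Int := df.length
  if total_size ≤ min_size then [(0, total_size - 1)]
  else
    let num_chunks := PySem.Int.floordiv total_size min_size
    ((PySem.List.pyRange 0 (num_chunks - 1) 1).map
      (fun i => (i * min_size, (i + 1) * min_size - 1))) ++ [((num_chunks - 1) * min_size, total_size - 1)]

-- ===== PRECONDITION & SPEC =====
-- Pre_ excludes min_size ≤ 0: the natural domain is a positive chunk size — at min_size = 0 A raises
-- ZeroDivisionError on nonempty df (so does B), and for negative min_size both programs' values are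
-- accidents of Python's floor division on that nonsensical input.
def Pre_split_dataframe_indices (df : List Int) (min_size : Int) : Prop := 1 ≤ min_size
instance (df : List Int) (min_size : Int) : Decidable (Pre_split_dataframe_indices df min_size) := by unfold Pre_split_dataframe_indices; infer_instance
def pvWitness_split_dataframe_indices : List Int × Int := ([1, 2, 3], 2)
def Spec_split_dataframe_indices (df : List Int) (min_size : Int) (out : List (Int × Int)) : Prop := out = split_dataframe_indices_alt df min_size
instance (df : List Int) (min_size : Int) (out : List (Int × Int)) : Decidable (Spec_split_dataframe_indices df min_size out) := by unfold Spec_split_dataframe_indices; infer_instance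

-- ===== CLAIM (what is proved, stated in full; the proofs are below) =====
def Claim_equal_split_dataframe_indices : Prop := ∀ (df : List Int) (min_size : Int), Dom_split_dataframe_indices df min_size → Pre_split_dataframe_indices df min_size → Spec_split_dataframe_indices df min_size (split_dataframe_indices df min_size)

-- ===== LEMMAS AND PROOFS =====

-- division brackets for positive divisor: k*ms ≤ n < (k+1)*ms where k = n // ms
lemma pv_fdiv_brackets (n ms : Int) (hms : 0 < ms) :
    PySem.Int.floordiv n ms * ms ≤ n ∧ n < (PySem.Int.floordiv n ms + 1) * ms := by
  have h := PySem.Int.floordiv_mul_add_mod n ms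
  have h2 : PySem.Int.mod n ms = n % ms := PySem.Int.mod_eq_emod_of_pos hms
  have h3 := Int.emod_nonneg n (ne_of_gt hms)
  have h4 := Int.emod_lt_of_pos n hms
  constructor
  · linarith [h, h2, h3]
  · have : (PySem.Int.floordiv n ms + 1) * ms = PySem.Int.floordiv n ms * ms + ms := by ring
    linarith [h, h2, h4]

-- after j iterations of A's loop (with the last chunk not yet reached) the state is in closed form
lemma pv_loopA (ms n : Int) (hms : 1 ≤ ms) (j : Nat)
    (hj : (j : Int) + 1 ≤ PySem.Int.floordiv n ms) :
    (PySem.List.pyRange 0 (j : Int) 1).foldl (pvStepA ms) ([], 0, n)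
      = ((PySem.List.pyRange 0 (j : Int) 1).map (fun i => (i * ms, (i + 1) * ms - 1)),
         (j : Int) * ms, n - (j : Int) * ms) := by
  induction j with
  | zero => simp [PySem.List.pyRange_one_eq_nil (le_refl (0 : Int))]
  | succ j ih =>
    have hj' : (j : Int) + 1 ≤ PySem.Int.floordiv n ms := by push_cast at hj ⊢; omega
    have hcast : ((j + 1 : Nat) : Int) = (j : Int) + 1 := by push_cast; ring
    rw [hcast, PySem.List.pyRange_one_succ_right (by positivity : (0:Int) ≤ (j:Int)),
        List.foldl_append, List.map_append, ih hj']
    -- the in-loop condition is false: 2*ms ≤ n - j*ms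
    have hbr := pv_fdiv_brackets n ms (by omega)
    have hk2 : ((j : Int) + 2) * ms ≤ PySem.Int.floordiv n ms * ms := by
      have : (j : Int) + 2 ≤ PySem.Int.floordiv n ms := by push_cast at hj; omega
      exact mul_le_mul_of_nonneg_right this (by omega)
    have hcond : ¬ (n - (j : Int) * ms - ms < ms) := by
      have : ((j : Int) + 2) * ms = (j : Int) * ms + ms + ms := by ring
      linarith [hbr.1, hk2]
    simp only [List.foldl_cons, List.foldl_nil, pvStepA, if_neg hcond]
    refine Prod.ext ?_ (Prod.ext ?_ ?_) <;> simp <;> ring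

-- ===== VERDICT (by name: the statement is the Claim_ definition above) =====
theorem split_dataframe_indices_spec : Claim_equal_split_dataframe_indices := by
  intro df min_size _hdom hpre
  unfold Spec_split_dataframe_indices split_dataframe_indices split_dataframe_indices_alt
  set n : Int := (df.length : Int) with hn
  by_cases hsmall : n ≤ min_size
  · simp [hsmall]
  · simp only [if_neg hsmall]
    have hms : 1 ≤ min_size := hpre
    have hmsn : min_size < n := lt_of_not_ge hsmall
    set k : Int := PySem.Int.floordiv n min_size with hk
    have hbr := pv_fdiv_brackets n min_size (by omega)
    have hk1 : 1 ≤ k := by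
      rw [hk, PySem.Int.le_floordiv_iff_mul_le (by omega : (0:Int) < min_size)]
      linarith
    -- split off the last loop iteration
    set j : Nat := (k - 1).toNat with hjdef
    have hjcast : (j : Int) = k - 1 := by rw [hjdef]; exact Int.toNat_of_nonneg (by omega)
    have hsplit : PySem.List.pyRange 0 k 1 = PySem.List.pyRange 0 (j : Int) 1 ++ [(j : Int)] := by
      have h := PySem.List.pyRange_one_succ_right (show (0:Int) ≤ k - 1 by omega)
      rw [sub_add_cancel] at h
      rw [hjcast]; exact h
    rw [hsplit, List.foldl_append, pv_loopA min_size n hms j (by rw [hjcast]; omega)]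
    -- last iteration: the condition fires, chunk takes all remaining rows
    have hcond : n - (j : Int) * min_size - min_size < min_size := by
      have h1 : (k + 1) * min_size = (k - 1) * min_size + min_size + min_size := by ring
      rw [hjcast]; linarith [hbr.2]
    simp only [List.foldl_cons, List.foldl_nil, pvStepA, if_pos hcond]
    simp only [gt_iff_lt, sub_self, lt_self_iff_false, if_false, hjcast]
    congr 1
    · congr 1; ring_nf
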